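-- pv_equiv track=rewrite | github.com/mandaringit/algopunya | SWEXP/A대비/카드셔플/shuffle.py | BFS
-- ===== SOURCE A (Python) =====
-- def shuffle(x, cards, N):
--     half = N // 2
--     left = cards[:half]
--     right = cards[half:]
--
--     if x < N // 2:
--         l = left[:half - x]
--         r = right[x:]
--         middle = list(zip(right[:x], left[half - x:half]))
--
--         shuffled = [*l]
--
--         for i, j in middle:
--             shuffled.append(i)
--             shuffled.append(j)
--
--         shuffled += r
--
--         return shuffled
--
--     else:
--         x = N - 1 - x
--         l = right[:half - x]
--         r = left[x:]
--         middle = list(zip(left[:x], right[half - x:half]))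
--
--         shuffled = [*l]
--
--         for i, j in middle:
--             shuffled.append(i)
--             shuffled.append(j)
--
--         shuffled += r
--
--         return shuffled
--
-- def BFS(start, N):
--     asc = sorted(start)
--     dec = list(reversed(asc))
--
--     q = [(start, 0)]
--     # visited = []
--     while q:
--         cards, depth = q.pop(0)
--         # visited.append(cards)
--         if depth > 5:
--             return -1
--
--         if cards == asc or cards == dec:
--             return depth
--
--         for i in range(1, N):
--             shuffled = shuffle(i, cards, N)
--             n_depth = depth + 1
--
--             if shuffled == asc or shuffled == dec:
--                 return n_depth
--
--             if n_depth < 5: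
--                 q.append((shuffled, n_depth))
--                 # visited.append(cards)
--
--     return -1
-- ===== SOURCE B (Python) =====
-- def _riffle(x, a, b, half):
--     # one cut-riffle: keep a[:half-x], interleave b[:x] with a[half-x:half], then b[x:]
--     head = a[:half - x]
--     mid = [c for p in zip(b[:x], a[half - x:half]) for c in p]
--     return head + mid + b[x:]
--
-- def _shuffle(x, cards, N):
--     half = N // 2
--     if x < half:
--         return _riffle(x, cards[:half], cards[half:], half)
--     else:
--         return _riffle(N - 1 - x, cards[half:], cards[:half], half)
--
-- def BFS(start, N):
--     asc = sorted(start)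
--     dec = asc[::-1]
--     frontier = [tuple(start)]
--     visited = {tuple(start)}
--     for depth in range(6):
--         if any(list(c) == asc or list(c) == dec for c in frontier):
--             return depth
--         if depth == 5:
--             break
--         nxt = []
--         for c in frontier:
--             for i in range(1, N):
--                 s = tuple(_shuffle(i, list(c), N))
--                 if s not in visited:
--                     visited.add(s)
--                     nxt.append(s)
--         if not nxt:
--             break
--         frontier = nxt
--     return -1
-- ===== Notes on version B (the rewrite author's own statement) =====
-- stated objective: alternative
-- what changed: A expands the full (N-1)-ary shuffle tree to depth 5 through a FIFO queue of (state, depth) pairs with no duplicate detection; B runs a level-by-level BFS that keeps a visited set of states, expands each state at most once, and stops early when a level contributes no new states.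
import Mathlib
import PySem

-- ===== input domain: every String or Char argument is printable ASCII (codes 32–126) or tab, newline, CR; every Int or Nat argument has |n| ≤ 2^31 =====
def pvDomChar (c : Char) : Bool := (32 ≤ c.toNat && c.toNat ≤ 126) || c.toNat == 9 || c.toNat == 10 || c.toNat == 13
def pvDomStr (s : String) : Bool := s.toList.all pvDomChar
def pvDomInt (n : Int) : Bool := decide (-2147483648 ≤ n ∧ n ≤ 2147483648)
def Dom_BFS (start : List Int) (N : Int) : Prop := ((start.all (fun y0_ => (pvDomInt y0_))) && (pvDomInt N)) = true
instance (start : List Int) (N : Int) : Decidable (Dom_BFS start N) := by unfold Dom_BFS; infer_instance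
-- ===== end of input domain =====

-- B replaces A's exhaustive depth-5 queue expansion with a level-by-level search that
-- skips already-visited states via a set and stops when a level adds no new state;
-- the return value is proved equal (objective: alternative algorithm, same worst-case cost).

-- ===== PORT A =====
-- literal port of shuffle(x, cards, N)
def shuffleA (x : Int) (cards : List Int) (N : Int) : List Int :=
  let half := PySem.Int.floordiv N 2
  let left := PySem.List.slice cards none (some half)
  let right := PySem.List.slice cards (some half) none
  if x < PySem.Int.floordiv N 2 then
    let l := PySem.List.slice left none (some (half - x))
    let r := PySem.List.slice right (some x) none
    let middle := (PySem.List.slice right none (some x)).zip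
                  (PySem.List.slice left (some (half - x)) (some half))
    let shuffled := middle.foldl (fun acc p => acc ++ [p.1, p.2]) l
    shuffled ++ r
  else
    let x := N - 1 - x
    let l := PySem.List.slice right none (some (half - x))
    let r := PySem.List.slice left (some x) none
    let middle := (PySem.List.slice left none (some x)).zip
                  (PySem.List.slice right (some (half - x)) (some half))
    let shuffled := middle.foldl (fun acc p => acc ++ [p.1, p.2]) l
    shuffled ++ r

-- the child list generated by A's inner for-loop (shared name, also used by the proofs)
def stepN (N : Int) (c : List Int) : List (List Int) :=
  (PySem.List.pyRange 1 N 1).map (fun i => shuffleA i c N)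

-- termination-measure helpers for A's while-loop (the queue only holds depths < 5)
def qWeight (M : ℕ) (d : Int) : ℕ := (M + 1) ^ ((5 - d).toNat)
def qMeasure (M : ℕ) (q : List (List Int × Int)) : ℕ := (q.map (fun p => qWeight M p.2)).sum

theorem qMeasure_append (M : ℕ) (a b : List (List Int × Int)) :
    qMeasure M (a ++ b) = qMeasure M a + qMeasure M b := by
  simp only [qMeasure, List.map_append, List.sum_append]

theorem qMeasure_cons (M : ℕ) (c : List Int) (d : Int) (rest : List (List Int × Int)) :
    qMeasure M ((c, d) :: rest) = qWeight M d + qMeasure M rest := by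
  simp only [qMeasure, List.map_cons, List.sum_cons]

theorem qMeasure_map_const (M : ℕ) (l : List (List Int)) (d : Int) :
    qMeasure M (l.map (fun s => (s, d))) = l.length * qWeight M d := by
  induction l with
  | nil => simp [qMeasure]
  | cons x xs ih =>
    simp only [List.map_cons, qMeasure_cons, List.length_cons] at ih ⊢
    rw [ih, Nat.succ_mul]; omega

theorem qWeight_pos (M : ℕ) (d : Int) : 0 < qWeight M d := by
  unfold qWeight; positivity

theorem qWeight_succ (M : ℕ) (d : Int) (hd : d ≤ 4) :
    qWeight M d = (M + 1) * qWeight M (d + 1) := by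
  unfold qWeight
  have h5 : (5 - d).toNat = (5 - (d + 1)).toNat + 1 := by omega
  rw [h5, pow_succ, Nat.mul_comm]

-- A's while-loop over the FIFO queue; the for-loop's early return on a sorted child is
-- rendered as an 'any' check (once the function returns, the queue content is irrelevant)
def BFSloopA (N : Int) (asc dec : List Int) (q : List (List Int × Int)) : Int :=
  match q with
  | [] => -1
  | (cards, depth) :: rest =>
    if depth > 5 then -1
    else if cards = asc ∨ cards = dec then depth
    else
      let children := stepN N cards
      if children.any (fun s => decide (s = asc) || decide (s = dec)) then depth + 1
      else BFSloopA N asc dec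
        (rest ++ (if depth + 1 < 5 then children.map (fun s => (s, depth + 1)) else []))
termination_by qMeasure (N - 1).toNat q
decreasing_by
  rw [qMeasure_append, qMeasure_cons]
  have hlen : (stepN N cards).length = (N - 1).toNat := by
    simp [stepN, PySem.List.length_pyRange_one]
  split_ifs with hlt
  · rw [qMeasure_map_const, hlen]
    have hw : qWeight (N - 1).toNat depth
        = ((N - 1).toNat + 1) * qWeight (N - 1).toNat (depth + 1) :=
      qWeight_succ _ _ (by omega)
    have hp : 0 < qWeight (N - 1).toNat (depth + 1) := qWeight_pos _ _
    have hexp : ((N - 1).toNat + 1) * qWeight (N - 1).toNat (depth + 1)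
        = (N - 1).toNat * qWeight (N - 1).toNat (depth + 1)
          + qWeight (N - 1).toNat (depth + 1) := by ring
    omega
  · have hp : 0 < qWeight (N - 1).toNat depth := qWeight_pos _ _
    simp only [qMeasure, List.map_nil, List.sum_nil]
    omega

def BFS (start : List Int) (N : Int) : Int :=
  let asc := PySem.List.sorted start (fun x => x) false
  let dec := asc.reverse
  BFSloopA N asc dec [(start, 0)]

-- ===== PORT B =====
def riffleB (x : Int) (a b : List Int) (half : Int) : List Int :=
  let head := PySem.List.slice a none (some (half - x))
  let mid := ((PySem.List.slice b none (some x)).zip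
              (PySem.List.slice a (some (half - x)) (some half))).flatMap (fun p => [p.1, p.2])
  head ++ mid ++ PySem.List.slice b (some x) none

def shuffleB (x : Int) (cards : List Int) (N : Int) : List Int :=
  let half := PySem.Int.floordiv N 2
  if x < half then
    riffleB x (PySem.List.slice cards none (some half))
      (PySem.List.slice cards (some half) none) half
  else
    riffleB (N - 1 - x) (PySem.List.slice cards (some half) none)
      (PySem.List.slice cards none (some half)) half

-- loop body of B's expansion: skip seen states, otherwise record them
def updB (st : List (List Int) × PySem.Set (List Int)) (s : List Int) :
    List (List Int) × PySem.Set (List Int) :=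
  if PySem.Set.contains st.2 s then st else (st.1 ++ [s], PySem.Set.add st.2 s)

def expandB (N : Int) (f : List (List Int)) (vis : PySem.Set (List Int)) :
    List (List Int) × PySem.Set (List Int) :=
  f.foldl (fun st c => (PySem.List.pyRange 1 N 1).foldl (fun st i => updB st (shuffleB i c N)) st)
    ([], vis)

-- B's 'for depth in range(6)' loop; j counts the levels still allowed (depth = 5 - j)
def altLoopB (N : Int) (asc dec : List Int) (j : ℕ) (f : List (List Int))
    (vis : PySem.Set (List Int)) : Int :=
  if f.any (fun c => decide (c = asc) || decide (c = dec)) then (5 : Int) - j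
  else
    match j with
    | 0 => -1
    | j' + 1 =>
      let p := expandB N f vis
      if p.1 = [] then -1 else altLoopB N asc dec j' p.1 p.2

def BFS_alt (start : List Int) (N : Int) : Int :=
  let asc := PySem.List.sorted start (fun x => x) false
  let dec := (PySem.List.slice? asc none none (-1)).getD []   -- asc[::-1]
  altLoopB N asc dec 5 [start] (PySem.Set.ofList [start])

-- ===== PRECONDITION & SPEC =====
def Spec_BFS (start : List Int) (N : Int) (out : Int) : Prop := out = BFS_alt start N
instance (start : List Int) (N : Int) (out : Int) : Decidable (Spec_BFS start N out) := by unfold Spec_BFS; infer_instance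

-- ===== CLAIM (what is proved, stated in full; the proofs are below) =====
def Claim_equal_BFS : Prop := ∀ (start : List Int) (N : Int), Dom_BFS start N → Spec_BFS start N (BFS start N)

-- ===== LEMMAS AND PROOFS =====

-- target test, the shared vocabulary of the proofs
def tgtB (asc dec c : List Int) : Bool := decide (c = asc) || decide (c = dec)

-- the common abstraction both loops are reduced to: scan exact-depth levels, f at depth 5 - j
def pres (N : Int) (asc dec : List Int) (j : ℕ) (f : List (List Int)) : Int :=
  if f.any (tgtB asc dec) then (5 : Int) - j
  else
    match j with
    | 0 => -1
    | j' + 1 => pres N asc dec j' (f.flatMap (stepN N))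

theorem pres_zero (N : Int) (asc dec : List Int) (f : List (List Int)) :
    pres N asc dec 0 f =
      if f.any (tgtB asc dec) = true then (5 : Int) - ((0 : ℕ) : Int) else -1 := by
  rw [pres]

theorem pres_succ (N : Int) (asc dec : List Int) (j' : ℕ) (f : List (List Int)) :
    pres N asc dec (j' + 1) f =
      if f.any (tgtB asc dec) = true then (5 : Int) - ((j' + 1 : ℕ) : Int)
      else pres N asc dec j' (f.flatMap (stepN N)) := by
  rw [pres]

-- A's queue, split as (rest of level at depth 4-k) ++ (already generated children at 5-k)
def phase (N : Int) (asc dec : List Int) (k : ℕ) (A B : List (List Int)) : Int :=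
  if (A.flatMap (stepN N)).any (tgtB asc dec) then (4 - (k : Int)) + 1
  else
    match k with
    | 0 => -1
    | k' + 1 => phase N asc dec k' (B ++ A.flatMap (stepN N)) []

theorem shuffle_eq (x : Int) (cards : List Int) (N : Int) :
    shuffleB x cards N = shuffleA x cards N := by
  simp only [shuffleA, shuffleB, riffleB]
  by_cases h : x < PySem.Int.floordiv N 2
  · rw [if_pos h, if_pos h]
    simp [List.flatMap, List.append_assoc]
  · rw [if_neg h, if_neg h]
    simp [List.flatMap, List.append_assoc]

theorem phase_zero (N : Int) (asc dec : List Int) (A B : List (List Int)) :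
    phase N asc dec 0 A B =
      if (A.flatMap (stepN N)).any (tgtB asc dec) = true then (4 - ((0 : ℕ) : Int)) + 1
      else -1 := by
  rw [phase]

theorem phase_succ' (N : Int) (asc dec : List Int) (k' : ℕ) (A B : List (List Int)) :
    phase N asc dec (k' + 1) A B =
      if (A.flatMap (stepN N)).any (tgtB asc dec) = true then (4 - ((k' + 1 : ℕ) : Int)) + 1
      else phase N asc dec k' (B ++ A.flatMap (stepN N)) [] := by
  rw [phase]

theorem phase_shift (N : Int) (asc dec : List Int) (k : ℕ) (c : List Int)
    (A B : List (List Int)) (hc : (stepN N c).any (tgtB asc dec) = false) :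
    phase N asc dec k (c :: A) B = phase N asc dec k A (B ++ stepN N c) := by
  cases k with
  | zero =>
    simp only [phase, List.flatMap_cons, List.any_append, hc, Bool.false_or]
  | succ k' =>
    simp only [phase, List.flatMap_cons, List.any_append, hc, Bool.false_or,
      List.append_assoc]

theorem loopA_phase (N : Int) (asc dec : List Int) : ∀ (k : ℕ), k ≤ 4 →
    ∀ (A B : List (List Int)),
    (∀ c ∈ A, tgtB asc dec c = false) → (∀ c ∈ B, tgtB asc dec c = false) →
    (k = 0 → B = []) →
    BFSloopA N asc dec
      (A.map (fun c => (c, (4 : Int) - (k : Int))) ++ B.map (fun c => (c, (5 : Int) - (k : Int))))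
      = phase N asc dec k A B := by
  intro k
  induction k with
  | zero =>
    intro hk A
    induction A with
    | nil =>
      intro B hA hB hB0
      have hBnil := hB0 rfl; subst hBnil
      simp [BFSloopA.eq_def, phase_zero]
    | cons c A' ihA =>
      intro B hA hB hB0
      have hBnil := hB0 rfl; subst hBnil
      have hc : tgtB asc dec c = false := hA c (by simp)
      have hc' : ¬(c = asc ∨ c = dec) := by
        simp only [tgtB, Bool.or_eq_false_iff, decide_eq_false_iff_not] at hc
        tauto
      rw [List.map_cons, List.cons_append, BFSloopA.eq_def]
      simp only []
      rw [if_neg (by omega : ¬((4 : Int) - ((0:ℕ):Int) > 5)), if_neg hc']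
      have hfun : (fun s => decide (s = asc) || decide (s = dec)) = tgtB asc dec := rfl
      rw [hfun]
      by_cases hany : (stepN N c).any (tgtB asc dec) = true
      · rw [if_pos hany, phase_zero,
          if_pos (by simp [List.flatMap_cons, List.any_append, hany])]
      · rw [if_neg hany,
          if_neg (by norm_num : ¬((4 : Int) - ((0:ℕ):Int) + 1 < 5))]
        simp only [List.map_nil, List.append_nil]
        have h3 := ihA [] (by intro x hx; exact hA x (by simp [hx])) (by simp) (fun _ => rfl)
        simp only [List.map_nil, List.append_nil] at h3
        rw [h3, phase_shift N asc dec 0 c A' [] (by simpa using hany)]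
        rw [phase_zero, phase_zero]
  | succ k' ihk =>
    intro hk A
    induction A with
    | nil =>
      intro B hA hB _
      have hdep : (5 : Int) - ((k' + 1 : ℕ) : Int) = (4 : Int) - ((k' : ℕ) : Int) := by
        push_cast; ring
      rw [List.map_nil, List.nil_append, hdep]
      have h3 := ihk (by omega) B [] hB (by simp) (fun _ => rfl)
      simp only [List.map_nil, List.append_nil] at h3
      rw [h3, phase_succ']
      simp only [List.flatMap_nil, List.any_nil, Bool.false_eq_true, if_false,
        List.append_nil]
    | cons c A' ihA =>
      intro B hA hB hB0
      have hc : tgtB asc dec c = false := hA c (by simp)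
      have hc' : ¬(c = asc ∨ c = dec) := by
        simp only [tgtB, Bool.or_eq_false_iff, decide_eq_false_iff_not] at hc
        tauto
      rw [List.map_cons, List.cons_append, BFSloopA.eq_def]
      simp only []
      rw [if_neg (by push_cast; omega : ¬((4 : Int) - ((k' + 1 : ℕ) : Int) > 5)), if_neg hc']
      have hfun : (fun s => decide (s = asc) || decide (s = dec)) = tgtB asc dec := rfl
      rw [hfun]
      by_cases hany : (stepN N c).any (tgtB asc dec) = true
      · rw [if_pos hany, phase_succ',
          if_pos (by simp [List.flatMap_cons, List.any_append, hany])]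
      · rw [if_neg hany,
          if_pos (by push_cast; omega : ((4 : Int) - ((k' + 1 : ℕ) : Int) + 1 < 5))]
        have hstep : (4 : Int) - ((k' + 1 : ℕ) : Int) + 1 = (5 : Int) - ((k' + 1 : ℕ) : Int) := by
          push_cast; ring
        rw [hstep, List.append_assoc, ← List.map_append]
        rw [ihA (B ++ stepN N c)
          (by intro x hx; exact hA x (by simp [hx]))
          (by
            intro x hx
            rcases List.mem_append.mp hx with h1 | h1
            · exact hB x h1
            · exact Bool.eq_false_iff.mpr (List.any_eq_false.mp (by simpa using hany) x h1))
          (by intro h; exact absurd h (Nat.succ_ne_zero k'))]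
        rw [phase_shift N asc dec (k' + 1) c A' B (by simpa using hany)]

theorem phase_pres (N : Int) (asc dec : List Int) : ∀ (k : ℕ) (A B : List (List Int)),
    (∀ c ∈ B, tgtB asc dec c = false) →
    phase N asc dec k A B = pres N asc dec k (B ++ A.flatMap (stepN N)) := by
  intro k
  induction k with
  | zero =>
    intro A B hB
    have hBany : B.any (tgtB asc dec) = false := List.any_eq_false.mpr (by
      intro c hcB; simp [hB c hcB])
    simp only [phase, pres, List.any_append, hBany, Bool.false_or]
    split
    · omega
    · rfl
  | succ k' ih =>
    intro A B hB
    have hBany : B.any (tgtB asc dec) = false := List.any_eq_false.mpr (by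
      intro c hcB; simp [hB c hcB])
    simp only [phase, pres, List.any_append, hBany, Bool.false_or]
    split
    · omega
    · rw [ih (B ++ A.flatMap (stepN N)) [] (by intro c h; simp at h)]
      simp

theorem A_top (N : Int) (asc dec start : List Int) :
    BFSloopA N asc dec [(start, 0)] = pres N asc dec 5 [start] := by
  have hfun : (fun s => decide (s = asc) || decide (s = dec)) = tgtB asc dec := rfl
  rw [BFSloopA.eq_def]
  simp only []
  rw [if_neg (by norm_num : ¬((0 : Int) > 5)), hfun]
  by_cases hs : start = asc ∨ start = dec
  · rw [if_pos hs]
    have h1 : tgtB asc dec start = true := by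
      rcases hs with h | h <;> simp [tgtB, h]
    rw [pres, if_pos (by simp [h1])]
    norm_num
  · have h1 : tgtB asc dec start = false := by
      simp only [tgtB, Bool.or_eq_false_iff, decide_eq_false_iff_not]
      tauto
    have r1 : pres N asc dec 5 [start] = pres N asc dec 4 ([start].flatMap (stepN N)) := by
      rw [pres, if_neg (by simp [h1])]
    rw [if_neg hs]
    by_cases hany : (stepN N start).any (tgtB asc dec) = true
    · rw [if_pos hany, r1]
      rw [pres, if_pos (by simp [hany])]
      norm_num
    · rw [if_neg hany, if_pos (by norm_num : ((0 : Int) + 1 < 5)), List.nil_append]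
      have hsub : ∀ x ∈ stepN N start, tgtB asc dec x = false := by
        intro x hx
        exact Bool.eq_false_iff.mpr (List.any_eq_false.mp (by simpa using hany) x hx)
      have hq := loopA_phase N asc dec 3 (by omega) (stepN N start) [] hsub (by simp)
        (by intro h; exact absurd h (by omega))
      simp only [List.map_nil, List.append_nil] at hq
      have hd : ((0 : Int) + 1) = (4 : Int) - ((3 : ℕ) : Int) := by norm_num
      rw [hd, hq, phase_pres N asc dec 3 (stepN N start) [] (by simp), List.nil_append]
      have r2 : pres N asc dec 4 ([start].flatMap (stepN N))
          = pres N asc dec 3 (([start].flatMap (stepN N)).flatMap (stepN N)) := by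
        rw [pres, if_neg (by simp [hany])]
      rw [r1, r2]
      simp

-- ---- B side ----
def sift (l : List (List Int)) (st : List (List Int) × PySem.Set (List Int)) :
    List (List Int) × PySem.Set (List Int) := l.foldl updB st

theorem expandB_eq_sift (N : Int) (f : List (List Int)) (vis : PySem.Set (List Int)) :
    expandB N f vis = sift (f.flatMap (stepN N)) ([], vis) := by
  suffices h : ∀ (g : List (List Int)) (st : List (List Int) × PySem.Set (List Int)),
      g.foldl (fun st c =>
        (PySem.List.pyRange 1 N 1).foldl (fun st i => updB st (shuffleB i c N)) st) st
      = sift (g.flatMap (stepN N)) st by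
    exact h f ([], vis)
  intro g
  induction g with
  | nil => intro st; simp [sift]
  | cons c g' ih =>
    intro st
    have hmap : (PySem.List.pyRange 1 N 1).map (fun i => shuffleB i c N) = stepN N c := by
      simp [stepN, shuffle_eq]
    have hinner : (PySem.List.pyRange 1 N 1).foldl (fun st i => updB st (shuffleB i c N)) st
        = (stepN N c).foldl updB st := by
      rw [← hmap, List.foldl_map]
    simp only [List.foldl_cons, List.flatMap_cons, hinner, ih, sift, List.foldl_append]

theorem sift_vis_mem : ∀ (l : List (List Int)) (nxt : List (List Int))
    (vis : PySem.Set (List Int)) (s : List Int),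
    s ∈ (sift l (nxt, vis)).2 ↔ s ∈ vis ∨ s ∈ l := by
  intro l
  induction l with
  | nil => intro nxt vis s; simp [sift]
  | cons x l' ih =>
    intro nxt vis s
    by_cases hxv : x ∈ vis
    · rw [show sift (x :: l') (nxt, vis) = sift l' (nxt, vis) by simp [sift, updB, hxv], ih]
      simp only [List.mem_cons]
      by_cases hsx : s = x
      · subst hsx; simp [hxv]
      · simp [hsx]
    · rw [show sift (x :: l') (nxt, vis) = sift l' (nxt ++ [x], PySem.Set.add vis x) by
        simp [sift, updB, hxv], ih]
      simp only [PySem.Set.mem_add, List.mem_cons]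
      tauto

theorem sift_nxt_mem : ∀ (l : List (List Int)) (nxt : List (List Int))
    (vis : PySem.Set (List Int)) (s : List Int),
    s ∈ (sift l (nxt, vis)).1 ↔ s ∈ nxt ∨ (s ∈ l ∧ s ∉ vis) := by
  intro l
  induction l with
  | nil => intro nxt vis s; simp [sift]
  | cons x l' ih =>
    intro nxt vis s
    by_cases hxv : x ∈ vis
    · rw [show sift (x :: l') (nxt, vis) = sift l' (nxt, vis) by simp [sift, updB, hxv], ih]
      simp only [List.mem_cons]
      by_cases hsx : s = x
      · subst hsx; simp [hxv]
      · simp [hsx]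
    · rw [show sift (x :: l') (nxt, vis) = sift l' (nxt ++ [x], PySem.Set.add vis x) by
        simp [sift, updB, hxv], ih]
      simp only [PySem.Set.mem_add, List.mem_append, List.mem_cons]
      by_cases hsx : s = x
      · subst hsx; simp [hxv]
      · simp [hsx]

theorem pres_dead (N : Int) (asc dec : List Int) (vis : PySem.Set (List Int))
    (htv : ∀ v ∈ vis, tgtB asc dec v = false)
    (hcl : ∀ v ∈ vis, ∀ s ∈ stepN N v, s ∈ vis) :
    ∀ (j : ℕ) (G : List (List Int)), (∀ c ∈ G, c ∈ vis) → pres N asc dec j G = -1 := by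
  intro j
  induction j with
  | zero =>
    intro G hG
    have : G.any (tgtB asc dec) = false := List.any_eq_false.mpr (by
      intro c hc; simp [htv c (hG c hc)])
    simp [pres, this]
  | succ j' ih =>
    intro G hG
    have hany : G.any (tgtB asc dec) = false := List.any_eq_false.mpr (by
      intro c hc; simp [htv c (hG c hc)])
    simp only [pres, hany, Bool.false_eq_true, if_false]
    exact ih _ (by
      intro c hc
      rcases List.mem_flatMap.mp hc with ⟨v, hv, hcs⟩
      exact hcl v (hG v hv) c hcs)

theorem alt_zero (N : Int) (asc dec : List Int) (f : List (List Int))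
    (vis : PySem.Set (List Int)) :
    altLoopB N asc dec 0 f vis =
      if f.any (tgtB asc dec) = true then (5 : Int) - ((0 : ℕ) : Int) else -1 := by
  rw [altLoopB]; rfl

theorem alt_succ (N : Int) (asc dec : List Int) (j' : ℕ) (f : List (List Int))
    (vis : PySem.Set (List Int)) :
    altLoopB N asc dec (j' + 1) f vis =
      if f.any (tgtB asc dec) = true then (5 : Int) - ((j' + 1 : ℕ) : Int)
      else if (expandB N f vis).1 = [] then -1
      else altLoopB N asc dec j' (expandB N f vis).1 (expandB N f vis).2 := by
  rw [altLoopB]; rfl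

theorem alt_pres (N : Int) (asc dec : List Int) : ∀ (j : ℕ) (F f : List (List Int))
    (vis : PySem.Set (List Int)),
    (∀ c ∈ f, c ∈ F) → (∀ c ∈ F, c ∈ vis) →
    (∀ c ∈ vis, tgtB asc dec c = true → c ∈ f) →
    (∀ v ∈ vis, v ∉ f → ∀ s ∈ stepN N v, s ∈ vis) →
    altLoopB N asc dec j f vis = pres N asc dec j F := by
  intro j
  induction j with
  | zero =>
    intro F f vis h1 h2 h3 h4
    rw [alt_zero, pres_zero]
    by_cases hf : f.any (tgtB asc dec) = true
    · rcases List.any_eq_true.mp hf with ⟨c, hcf, hct⟩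
      rw [if_pos hf, if_pos (List.any_eq_true.mpr ⟨c, h1 c hcf, hct⟩)]
    · have hF : ¬F.any (tgtB asc dec) = true := by
        intro hFt
        rcases List.any_eq_true.mp hFt with ⟨c, hcF, hct⟩
        exact hf (List.any_eq_true.mpr ⟨c, h3 c (h2 c hcF) hct, hct⟩)
      rw [if_neg hf, if_neg hF]
  | succ j' ih =>
    intro F f vis h1 h2 h3 h4
    rw [alt_succ, pres_succ]
    by_cases hf : f.any (tgtB asc dec) = true
    · rcases List.any_eq_true.mp hf with ⟨c, hcf, hct⟩
      rw [if_pos hf, if_pos (List.any_eq_true.mpr ⟨c, h1 c hcf, hct⟩)]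
    · have hF : ¬F.any (tgtB asc dec) = true := by
        intro hFt
        rcases List.any_eq_true.mp hFt with ⟨c, hcF, hct⟩
        exact hf (List.any_eq_true.mpr ⟨c, h3 c (h2 c hcF) hct, hct⟩)
      rw [if_neg hf, if_neg hF]
      have htv : ∀ v ∈ vis, tgtB asc dec v = false := by
        intro v hv
        rcases Bool.eq_false_or_eq_true (tgtB asc dec v) with h | h
        · exact absurd (List.any_eq_true.mpr ⟨v, h3 v hv h, h⟩) hf
        · exact h
      have hv' : ∀ s, s ∈ (expandB N f vis).2 ↔ s ∈ vis ∨ s ∈ f.flatMap (stepN N) := by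
        intro s; rw [expandB_eq_sift]; exact sift_vis_mem _ _ _ _
      have hn' : ∀ s, s ∈ (expandB N f vis).1 ↔ s ∈ f.flatMap (stepN N) ∧ s ∉ vis := by
        intro s; rw [expandB_eq_sift]
        simpa using sift_nxt_mem (f.flatMap (stepN N)) [] vis s
      by_cases hnil : (expandB N f vis).1 = []
      · rw [if_pos hnil]
        have hLsub : ∀ s ∈ f.flatMap (stepN N), s ∈ vis := by
          intro s hs
          by_contra hsv
          have hmem : s ∈ (expandB N f vis).1 := (hn' s).mpr ⟨hs, hsv⟩
          rw [hnil] at hmem; simp at hmem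
        have hcl : ∀ v ∈ vis, ∀ s ∈ stepN N v, s ∈ vis := by
          intro v hv s hs
          by_cases hvf : v ∈ f
          · exact hLsub s (List.mem_flatMap.mpr ⟨v, hvf, hs⟩)
          · exact h4 v hv hvf s hs
        have hG : ∀ c ∈ F.flatMap (stepN N), c ∈ vis := by
          intro c hc
          rcases List.mem_flatMap.mp hc with ⟨v, hvF, hcs⟩
          exact hcl v (h2 v hvF) c hcs
        exact (pres_dead N asc dec vis htv hcl j' _ hG).symm
      · rw [if_neg hnil]
        apply ih (F.flatMap (stepN N)) (expandB N f vis).1 (expandB N f vis).2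
        · intro c hc
          rcases List.mem_flatMap.mp ((hn' c).mp hc).1 with ⟨v, hvf, hcs⟩
          exact List.mem_flatMap.mpr ⟨v, h1 v hvf, hcs⟩
        · intro c hc
          rcases List.mem_flatMap.mp hc with ⟨v, hvF, hcs⟩
          by_cases hvf : v ∈ f
          · exact (hv' c).mpr (Or.inr (List.mem_flatMap.mpr ⟨v, hvf, hcs⟩))
          · exact (hv' c).mpr (Or.inl (h4 v (h2 v hvF) hvf c hcs))
        · intro c hc hct
          by_cases hcvis : c ∈ vis
          · exact absurd hct (by simp [htv c hcvis])
          · have hcL : c ∈ f.flatMap (stepN N) := by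
              rcases (hv' c).mp hc with h | h
              · exact absurd h hcvis
              · exact h
            exact (hn' c).mpr ⟨hcL, hcvis⟩
        · intro v hv hvn s hs
          by_cases hvvis : v ∈ vis
          · by_cases hvf : v ∈ f
            · exact (hv' s).mpr (Or.inr (List.mem_flatMap.mpr ⟨v, hvf, hs⟩))
            · exact (hv' s).mpr (Or.inl (h4 v hvvis hvf s hs))
          · have hvL : v ∈ f.flatMap (stepN N) := by
              rcases (hv' v).mp hv with h | h
              · exact absurd h hvvis
              · exact h
            exact absurd ((hn' v).mpr ⟨hvL, hvvis⟩) hvn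

theorem B_top (N : Int) (asc dec start : List Int) :
    altLoopB N asc dec 5 [start] (PySem.Set.ofList [start]) = pres N asc dec 5 [start] := by
  apply alt_pres N asc dec 5 [start] [start] (PySem.Set.ofList [start])
  · exact fun c h => h
  · intro c h; simpa [PySem.Set.mem_ofList] using h
  · intro c hc _; simpa [PySem.Set.mem_ofList] using hc
  · intro v hv hvf s hs
    exact absurd (show v ∈ [start] by simpa [PySem.Set.mem_ofList] using hv) hvf

-- ===== VERDICT (by name: the statement is the Claim_ definition above) =====
theorem BFS_spec : Claim_equal_BFS := by
  intro start N _
  unfold Spec_BFS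
  simp only [BFS, BFS_alt, PySem.List.slice?_none_none_neg_one, Option.getD_some, A_top, B_top]
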